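-- pv_equiv track=rewrite | github.com/Quelklef/gin-bots | client.py | calculate_other_hand
-- ===== SOURCE A (Python) =====
-- def calculate_other_hand(history):
--   """ From a history, calculate the cards that are definitely in the other player's hand
--   Assumes that the current turn is 'our' turn. """
--
--   # whose turn was the first turn
--   their_turn = len(history) % 2 != 0
--
--   their_hand = set()
--
--   # discard pile
--   discard = []
--
--   # simulate game
--   for draw_choice, discard_choice in history:
--     if draw_choice == 'discard':
--       card = discard.pop()
--       if their_turn:
--         their_hand.add(card)
--
--     discard.append(discard_choice)
--     if their_turn:
--       their_hand.discard(discard_choice)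
--
--     their_turn = not their_turn
--
--   return their_hand
-- ===== SOURCE B (Python) =====
-- def calculate_other_hand(history):
--   """ From a history, calculate the cards that are definitely in the other player's hand
--   Assumes that the current turn is 'our' turn. """
--   # The opponent's turns are exactly the indices i = (len(history)+1) % 2, +2, +2, ...
--   # (the last turn, index len-1, is always theirs).  The card popped from the discard
--   # pile on turn i is always the card discarded on turn i-1, so no pile is simulated.
--   their_hand = set()
--   for i in range((len(history) + 1) % 2, len(history), 2):
--     draw_choice, discard_choice = history[i]
--     if draw_choice == 'discard' and i > 0:
--       their_hand.add(history[i - 1][1])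
--     their_hand.discard(discard_choice)
--   return their_hand
-- ===== Notes on version B (the rewrite author's own statement) =====
-- stated objective: simpler
-- what changed: Instead of simulating every turn with a turn flag and a discard-pile list, B iterates only over the opponent's turn indices (a stride-2 range) and reads the card picked from the pile as the previous turn's discard, so no pile and no flag are maintained.
import Mathlib
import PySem

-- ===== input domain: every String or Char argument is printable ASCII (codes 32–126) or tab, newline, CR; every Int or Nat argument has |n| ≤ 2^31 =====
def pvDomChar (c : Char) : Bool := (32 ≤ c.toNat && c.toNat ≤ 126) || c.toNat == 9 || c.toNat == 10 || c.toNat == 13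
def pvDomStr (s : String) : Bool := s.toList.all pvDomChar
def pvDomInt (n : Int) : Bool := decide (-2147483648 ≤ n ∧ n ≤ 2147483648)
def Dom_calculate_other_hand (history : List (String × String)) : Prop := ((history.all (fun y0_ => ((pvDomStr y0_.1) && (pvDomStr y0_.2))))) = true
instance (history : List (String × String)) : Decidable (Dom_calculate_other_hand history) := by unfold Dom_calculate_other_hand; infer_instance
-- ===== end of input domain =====

-- B replaces A's turn-flag + discard-pile simulation by a single stride-2 loop over the
-- opponent's turn indices, reading the popped card as the previous turn's discard (objective: simpler).


-- ===== PORT A =====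
-- A's loop: turn flag, their_hand set, discard stack; discard.pop() on an empty pile is `none`.
def pvLoopA : Bool → PySem.Set String → List String → List (String × String) → Option (PySem.Set String)
  | _, hand, _, [] => some hand
  | t, hand, disc, (dc, xc) :: rest =>
    if dc == "discard" then
      match PySem.List.pop? disc with
      | none => none  -- IndexError: pop from empty list
      | some (card, disc') =>
        let hand1 := if t then PySem.Set.add hand card else hand
        let hand2 := if t then PySem.Set.discard hand1 xc else hand1
        pvLoopA (!t) hand2 (disc' ++ [xc]) rest
    else
      let hand2 := if t then PySem.Set.discard hand xc else hand
      pvLoopA (!t) hand2 (disc ++ [xc]) rest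

def calculate_other_hand (history : List (String × String)) : List String :=
  (pvLoopA (decide (history.length % 2 ≠ 0)) PySem.Set.empty [] history).getD PySem.Set.empty

-- ===== PORT B =====
-- loop body of B's `for i in range((len(history)+1) % 2, len(history), 2)`
def pvStepB (history : List (String × String)) (hand : PySem.Set String) (i : Int) : PySem.Set String :=
  let mv := PySem.List.pyGetD history i ("", "")
  let hand1 := if mv.1 == "discard" && decide (0 < i) then
      PySem.Set.add hand (PySem.List.pyGetD history (i - 1) ("", "")).2
    else hand
  PySem.Set.discard hand1 mv.2

def calculate_other_hand_alt (history : List (String × String)) : List String :=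
  (PySem.List.pyRange (((history.length : Int) + 1) % 2) (history.length : Int) 2).foldl
    (pvStepB history) PySem.Set.empty

-- ===== PRECONDITION & SPEC =====
-- Pre_ excludes exactly the histories whose very first turn draws from the (empty) discard
-- pile: there Python A raises IndexError ('pop from empty list').
def Pre_calculate_other_hand (history : List (String × String)) : Prop :=
  ∀ mv ∈ history.head?, mv.1 ≠ "discard"
instance (history : List (String × String)) : Decidable (Pre_calculate_other_hand history) := by
  unfold Pre_calculate_other_hand; infer_instance

def pvWitness_calculate_other_hand : (List (String × String)) := [("deck", "a"), ("discard", "b")]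

def Spec_calculate_other_hand (history : List (String × String)) (out : List String) : Prop := out = calculate_other_hand_alt history
instance (history : List (String × String)) (out : List String) : Decidable (Spec_calculate_other_hand history out) := by unfold Spec_calculate_other_hand; infer_instance

-- ===== CLAIM (what is proved, stated in full; the proofs are below) =====
def Claim_equal_calculate_other_hand : Prop := ∀ (history : List (String × String)), Dom_calculate_other_hand history → Pre_calculate_other_hand history → Spec_calculate_other_hand history (calculate_other_hand history)

-- ===== LEMMAS AND PROOFS =====

-- Reference recursion: processes the history one turn at a time carrying only the turn flag
-- and the top of the discard pile (`prev`).  Both ports are reduced to it.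
def pvLoopB : Bool → PySem.Set String → Option String → List (String × String) → PySem.Set String
  | _, hand, _, [] => hand
  | t, hand, prev, (dc, xc) :: rest =>
    let hand1 := if t then
        PySem.Set.discard
          (match prev, dc == "discard" with
           | some c, true => PySem.Set.add hand c
           | _, _ => hand) xc
      else hand
    pvLoopB (!t) hand1 (some xc) rest

lemma pyRange_two_nil (a b : Int) (h : b ≤ a) : PySem.List.pyRange a b 2 = [] := by
  rw [PySem.List.pyRange_of_pos a b (by norm_num)]
  simp [not_lt.mpr h]

lemma pyRange_two_cons (a b : Int) (h : a < b) :
    PySem.List.pyRange a b 2 = a :: PySem.List.pyRange (a + 2) b 2 := by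
  rw [PySem.List.pyRange_of_pos a b (by norm_num), PySem.List.pyRange_of_pos (a+2) b (by norm_num)]
  have h1 : ((b - a + 2 - 1) / 2).toNat = ((b - (a+2) + 2 - 1) / 2).toNat + 1 := by omega
  by_cases h2 : a + 2 < b
  · simp only [if_pos h, if_pos h2, h1, List.range_succ_eq_map]
    simp only [List.map_cons, List.map_map]
    congr 1
    · norm_num
    · apply List.map_congr_left; intro k _
      simp only [Function.comp_apply]
      push_cast; ring
  · have h3 : ((b - (a+2) + 2 - 1) / 2).toNat = 0 := by omega
    have h4 : ((b - a + 2 - 1) / 2).toNat = 1 := by omega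
    simp [if_pos h, h3, h4, List.range_succ]

-- A's loop equals the reference recursion, with `prev` the top of the discard pile,
-- provided the pile is nonempty whenever the next turn draws from it.
lemma pvLoopA_eq (rest : List (String × String)) :
    ∀ (t : Bool) (hand : PySem.Set String) (disc : List String),
    (disc = [] → ∀ mv ∈ rest.head?, mv.1 ≠ "discard") →
    pvLoopA t hand disc rest = some (pvLoopB t hand disc.getLast? rest) := by
  induction rest with
  | nil => intro t hand disc _; rfl
  | cons hd tl ih =>
    intro t hand disc hcond
    obtain ⟨dc, xc⟩ := hd
    by_cases hdc : dc = "discard"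
    · -- the pile must be nonempty
      rcases List.eq_nil_or_concat disc with hnil | ⟨ds, c, hds⟩
      · exact absurd hdc (hcond hnil (dc, xc) rfl)
      · subst hds hdc
        simp only [pvLoopA, pvLoopB, List.concat_eq_append, beq_self_eq_true, if_pos,
          PySem.List.pop?_last, List.getLast?_concat]
        rw [ih (!t) _ (ds ++ [xc]) (by simp)]
        cases t <;> simp
    · have hbeq : (dc == "discard") = false := by simp [hdc]
      simp only [pvLoopA, pvLoopB, hbeq, if_neg, Bool.false_eq_true, not_false_iff]
      rw [ih (!t) _ (disc ++ [xc]) (by simp)]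
      simp

-- the `prev` value seen at position s
def pvPrev (history : List (String × String)) (s : Nat) : Option String :=
  if s = 0 then none else some (PySem.List.pyGetD history ((s : Int) - 1) ("", "")).2

lemma pvStepB_eq (history : List (String × String)) (s : Nat) (hand : PySem.Set String)
    (hs : s < history.length) :
    pvStepB history hand (s : Int) =
      PySem.Set.discard
        (match pvPrev history s, history[s].1 == "discard" with
         | some c, true => PySem.Set.add hand c
         | _, _ => hand) history[s].2 := by
  have hget : PySem.List.pyGetD history (s : Int) ("", "") = history[s] := by
    rw [PySem.List.pyGetD_natCast]; exact List.getD_eq_getElem _ _ hs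
  cases s with
  | zero =>
    simp only [pvStepB, pvPrev, hget]
    simp
  | succ j =>
    have hprev : pvPrev history (j+1) = some (PySem.List.pyGetD history ((j : Int)) ("", "")).2 := by
      simp only [pvPrev]
      norm_num
    simp only [pvStepB, hget, hprev]
    cases hdc : (history[j+1].1 == "discard") <;> simp

-- B's stride-2 fold from an opponent-turn index s equals the reference recursion on the
-- suffix from s, started on `their` turn.
lemma pvFoldB_eq (history : List (String × String)) :
    ∀ (k : Nat), ∀ (s : Nat) (hand : PySem.Set String), s + k = history.length → k % 2 = 1 →
    (PySem.List.pyRange (s : Int) (history.length : Int) 2).foldl (pvStepB history) hand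
      = pvLoopB true hand (pvPrev history s) (history.drop s) := by
  intro k
  induction k using Nat.strong_induction_on with
  | _ k ih =>
    intro s hand hlen hpar
    have hk1 : 1 ≤ k := by omega
    have hs : s < history.length := by omega
    rw [pyRange_two_cons _ _ (by exact_mod_cast hs), List.foldl_cons,
        List.drop_eq_getElem_cons hs]
    have hs2 : ((s : Int) + 2) = ((s + 2 : Nat) : Int) := by push_cast; ring
    rw [hs2]
    simp only [pvLoopB]
    rw [pvStepB_eq history s hand hs]
    by_cases hend : s + 1 = history.length
    · -- last turn
      have hdrop : history.drop (s + 1) = [] := by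
        apply List.drop_eq_nil_of_le; omega
      rw [pyRange_two_nil _ _ (by omega), hdrop]
      simp [pvLoopB]
    · -- an 'our' turn follows, then recurse two positions later
      have hs1 : s + 1 < history.length := by omega
      rw [List.drop_eq_getElem_cons hs1]
      simp only [pvLoopB, Bool.not_true, if_neg, Bool.false_eq_true, not_false_iff]
      have hprev2 : pvPrev history (s + 2) = some history[s+1].2 := by
        simp only [pvPrev]
        have : ((s + 2 : Nat) : Int) - 1 = ((s + 1 : Nat) : Int) := by push_cast; ring
        rw [if_neg (by omega), this, PySem.List.pyGetD_natCast,
            List.getD_eq_getElem _ _ hs1]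
      rw [ih (k - 2) (by omega) (s + 2) _ (by omega) (by omega), hprev2]
      simp [List.get_eq_getElem, show s + 1 + 1 = s + 2 from by omega]

lemma calc_eq_loopB (history : List (String × String))
    (hpre : Pre_calculate_other_hand history) :
    calculate_other_hand history
      = pvLoopB (decide (history.length % 2 ≠ 0)) PySem.Set.empty none history := by
  unfold calculate_other_hand
  rw [pvLoopA_eq history _ PySem.Set.empty [] (fun _ => hpre)]
  rfl

-- ===== VERDICT (by name: the statement is the Claim_ definition above) =====
theorem calculate_other_hand_spec : Claim_equal_calculate_other_hand := by
  unfold Claim_equal_calculate_other_hand Spec_calculate_other_hand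
  intro history _ hpre
  rw [calc_eq_loopB history hpre]
  unfold calculate_other_hand_alt
  by_cases hpar : history.length % 2 = 1
  · -- odd length: their turn is first, B starts at index 0
    have h0 : (((history.length : Int)) + 1) % 2 = ((0 : Nat) : Int) := by omega
    rw [h0, pvFoldB_eq history history.length 0 PySem.Set.empty (by omega) hpar]
    simp [pvPrev, hpar]
  · -- even length
    have hpar2 : history.length % 2 = 0 := by omega
    by_cases hnil : history = []
    · subst hnil
      simp [pvLoopB, pyRange_two_nil 1 0 (by norm_num)]
    · obtain ⟨hd, tl, hist⟩ := List.exists_cons_of_ne_nil hnil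
      have hlen : history.length = tl.length + 1 := by rw [hist]; simp
      have h1 : (((history.length : Int)) + 1) % 2 = ((1 : Nat) : Int) := by omega
      rw [h1, pvFoldB_eq history (history.length - 1) 1 PySem.Set.empty (by omega) (by omega)]
      have hprev1 : pvPrev history 1 = some hd.2 := by
        simp [pvPrev, hist]
      rw [hprev1, hist]
      rw [hist] at hpar2
      simp only [List.length_cons] at hpar2 ⊢
      simp [pvLoopB, hpar2]
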